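-- pv_equiv track=rewrite | github.com/terenceyao1219/PS3-Invizimals-Unpack-Tools | bliTexUnpacker.py | base_get_src_pos
-- ===== SOURCE A (Python) =====
-- def base_get_src_pos(size: int, x: int, y: int) -> int:
--     if size == 4:
--         return 0
--     half = size // 2
--     if x < half:
--         if y < half: # top left quadrant
--             return base_get_src_pos(half, x, y)
--         else: # bottom left quadrant
--             return base_get_src_pos(half, x, y - half) + (size * size // 2)
--     else:
--         if y < half: # top right quadrant
--             return base_get_src_pos(half, x - half, y) + (size * size // 4)
--         else: # bottom right quadrant
--             return base_get_src_pos(half, x - half, y - half) + (3 * size * size // 4)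
-- ===== SOURCE B (Python) =====
-- def base_get_src_pos(size: int, x: int, y: int) -> int:
--     result = 0
--     while size > 4:
--         half = size // 2
--         result += (size * size // 4 if x >= half else 0) + (size * size // 2 if y >= half else 0)
--         if x >= half:
--             x -= half
--         if y >= half:
--             y -= half
--         size = half
--     if size != 4:
--         raise ValueError("size must be a power of two >= 4")
--     return result
-- ===== Notes on version B (the rewrite author's own statement) =====
-- stated objective: alternative
-- what changed: Replaces the four-way recursive descent (which adds each quadrant offset after the recursive call returns) by an iterative while-loop with a running accumulator that adds the per-level x- and y-offsets independently before halving.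
import Mathlib
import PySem

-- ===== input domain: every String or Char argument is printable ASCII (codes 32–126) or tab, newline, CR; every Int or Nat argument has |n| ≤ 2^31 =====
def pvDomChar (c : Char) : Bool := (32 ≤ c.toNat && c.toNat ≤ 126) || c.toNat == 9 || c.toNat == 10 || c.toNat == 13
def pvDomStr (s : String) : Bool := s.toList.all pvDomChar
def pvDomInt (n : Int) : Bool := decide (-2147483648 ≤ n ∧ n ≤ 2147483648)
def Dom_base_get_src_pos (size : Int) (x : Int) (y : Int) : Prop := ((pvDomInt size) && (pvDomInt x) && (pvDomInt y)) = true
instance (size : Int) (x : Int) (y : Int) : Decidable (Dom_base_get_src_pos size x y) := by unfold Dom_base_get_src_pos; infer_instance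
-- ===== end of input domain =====

-- B replaces A's four-way recursive descent by an iterative accumulator loop that adds
-- the per-level x- and y-quadrant offsets independently (objective: alternative decomposition).

-- ===== PORT A =====
-- Literal port of A's recursion, made total with a fuel counter (size.toNat bounds the
-- recursion depth on every input Pre_ admits; on other inputs the Python recurses forever,
-- and those are excluded by Pre_).
def pvAGo : Nat → Int → Int → Int → Int
  | 0, _, _, _ => 0  -- fuel exhausted: Python never returns here (outside Pre_)
  | fuel + 1, size, x, y =>
    if size = 4 then 0
    else
      let half := PySem.Int.floordiv size 2
      if x < half then
        if y < half then
          pvAGo fuel half x y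
        else
          pvAGo fuel half x (y - half) + PySem.Int.floordiv (size * size) 2
      else
        if y < half then
          pvAGo fuel half (x - half) y + PySem.Int.floordiv (size * size) 4
        else
          pvAGo fuel half (x - half) (y - half) + PySem.Int.floordiv (3 * size * size) 4

def base_get_src_pos (size : Int) (x : Int) (y : Int) : Int :=
  pvAGo size.toNat size x y

-- ===== PORT B =====
-- The while-loop of Source B: state (size, x, y, result), one iteration per level; the fuel
-- counter only makes the loop total in Lean (size.toNat bounds the iteration count on
-- every input, since the loop runs only while 4 < size and size halves each turn).
-- Returns the final (size, result) pair so the validation after the loop can be ported.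
def pvBGo : Nat → Int → Int → Int → Int → Int × Int
  | 0, size, _, _, result => (size, result)  -- fuel never runs out: size.toNat iterations suffice
  | fuel + 1, size, x, y, result =>
    if 4 < size then
      let half := PySem.Int.floordiv size 2
      pvBGo fuel half
        (if half ≤ x then x - half else x)
        (if half ≤ y then y - half else y)
        (result + ((if half ≤ x then PySem.Int.floordiv (size * size) 4 else 0)
                 + (if half ≤ y then PySem.Int.floordiv (size * size) 2 else 0)))
    else (size, result)

def base_get_src_pos_alt (size : Int) (x : Int) (y : Int) : Int :=
  let sr := pvBGo size.toNat size x y 0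
  if sr.1 = 4 then sr.2 else 0  -- Python raises ValueError when the loop ends with size ≠ 4 (outside Pre_)

-- ===== PRECONDITION & SPEC =====
-- Pre_: repeated floor-halving of size reaches exactly 4 (equivalently 4*2^k <= size < 5*2^k
-- for some k, stated in closed form via log2) -- exactly the inputs where the Python A returns;
-- on every other size A recurses forever (RecursionError) and B raises ValueError.
def Pre_base_get_src_pos (size : Int) (x : Int) (y : Int) : Prop :=
  4 ≤ size ∧ size.toNat < 5 * 2 ^ (Nat.log2 size.toNat - 2)
instance (size : Int) (x : Int) (y : Int) : Decidable (Pre_base_get_src_pos size x y) := by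
  unfold Pre_base_get_src_pos; infer_instance

def pvWitness_base_get_src_pos : Int × Int × Int := (16, 3, 9)

def Spec_base_get_src_pos (size : Int) (x : Int) (y : Int) (out : Int) : Prop := out = base_get_src_pos_alt size x y
instance (size : Int) (x : Int) (y : Int) (out : Int) : Decidable (Spec_base_get_src_pos size x y out) := by unfold Spec_base_get_src_pos; infer_instance

-- ===== CLAIM (what is proved, stated in full; the proofs are below) =====
def Claim_equal_base_get_src_pos : Prop := ∀ (size : Int) (x : Int) (y : Int), Dom_base_get_src_pos size x y → Pre_base_get_src_pos size x y → Spec_base_get_src_pos size x y (base_get_src_pos size x y)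

-- ===== LEMMAS AND PROOFS =====

-- Loop/recursion correspondence: whenever size lies in [4*2^k, 5*2^k) (so halving reaches 4
-- in exactly k steps), B's loop ends at size 4 with acc plus exactly what A's recursion returns.
lemma pv_go_eq : ∀ (fuel k : ℕ), k + 1 ≤ fuel → ∀ (size x y acc : Int),
    4 * 2 ^ k ≤ size → size < 5 * 2 ^ k →
    pvBGo fuel size x y acc = (4, acc + pvAGo fuel size x y) := by
  intro fuel
  induction fuel with
  | zero => intro k hk; omega
  | succ f ih =>
      intro k hk size x y acc h1 h2
      cases k with
      | zero =>
          have hs : size = 4 := by norm_num at h1 h2; omega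
          subst hs
          norm_num [pvAGo, pvBGo]
      | succ k =>
          have hp : (0:ℤ) < 2 ^ k := by positivity
          rw [pow_succ] at h1 h2
          have hlt : (4:ℤ) < size := by nlinarith
          have hne : size ≠ 4 := by omega
          have hhalf : PySem.Int.floordiv size 2 = size / 2 :=
            PySem.Int.floordiv_eq_ediv_of_pos (by norm_num)
          have hb1 : 4 * 2 ^ k ≤ size / 2 := by omega
          have hb2 : size / 2 < 5 * 2 ^ k := by omega
          have hq : PySem.Int.floordiv (size * size) 4 + PySem.Int.floordiv (size * size) 2
              = PySem.Int.floordiv (3 * size * size) 4 := by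
            rw [PySem.Int.floordiv_eq_ediv_of_pos (by norm_num),
              PySem.Int.floordiv_eq_ediv_of_pos (by norm_num),
              PySem.Int.floordiv_eq_ediv_of_pos (by norm_num),
              show 3 * size * size = 3 * (size * size) from by ring]
            have ht : 0 ≤ size * size := mul_self_nonneg size
            have hmod : size * size % 4 = 0 ∨ size * size % 4 = 1 := by
              rcases Int.even_or_odd size with ⟨a, ha⟩ | ⟨a, ha⟩
              · left
                rw [ha, show (a + a) * (a + a) = 4 * (a * a) from by ring]
                exact Int.mul_emod_right 4 (a * a)
              · right
                rw [ha, show (2 * a + 1) * (2 * a + 1) = 4 * (a * a + a) + 1 from by ring]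
                generalize a * a + a = u
                omega
            generalize size * size = t at ht hmod ⊢
            omega
          have ihk := fun x y acc => ih k (by omega) (size / 2) x y acc hb1 hb2
          rw [pvAGo, pvBGo]
          simp only [hne, hlt, if_false, if_true, hhalf]
          rcases lt_or_ge x (size / 2) with hx | hx <;>
            rcases lt_or_ge y (size / 2) with hy | hy
          · have hx' : ¬ size / 2 ≤ x := not_le.mpr hx
            have hy' : ¬ size / 2 ≤ y := not_le.mpr hy
            simp only [hx, hy, hx', hy', if_true, if_false, ihk]
            norm_num
          · have hx' : ¬ size / 2 ≤ x := not_le.mpr hx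
            have hy' : ¬ y < size / 2 := not_lt.mpr hy
            simp only [hx, hy, hx', hy', if_true, if_false, ihk]
            exact Prod.ext rfl (by ring)
          · have hx' : ¬ x < size / 2 := not_lt.mpr hx
            have hy' : ¬ size / 2 ≤ y := not_le.mpr hy
            simp only [hx, hy, hx', hy', if_true, if_false, ihk]
            exact Prod.ext rfl (by ring)
          · have hx' : ¬ x < size / 2 := not_lt.mpr hx
            have hy' : ¬ y < size / 2 := not_lt.mpr hy
            simp only [hx, hy, hx', hy', if_true, if_false, ihk]
            refine Prod.ext rfl ?_
            simp only
            linarith [hq]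

lemma pv_fuel_enough (k : ℕ) (size : Int) (h : 4 * 2 ^ k ≤ size) : k + 1 ≤ size.toNat := by
  have h2 : k < 2 ^ k := Nat.lt_two_pow_self
  have h3 : ((4 * 2 ^ k : ℕ) : ℤ) ≤ size := by push_cast; exact h
  have h4 := Int.toNat_le_toNat h3
  rw [Int.toNat_natCast] at h4
  omega

-- Pre_'s closed form says exactly: the halving chain reaches 4, i.e. 4*2^k ≤ size < 5*2^k.
lemma pv_pre_chain (size x y : Int) (h : Pre_base_get_src_pos size x y) :
    ∃ k : ℕ, 4 * 2 ^ k ≤ size ∧ size < 5 * 2 ^ k := by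
  obtain ⟨h4, hlt⟩ := h
  set n := size.toNat with hn'
  have hn : (n : ℤ) = size := Int.toNat_of_nonneg (by omega)
  have hn4 : 4 ≤ n := by omega
  set m := Nat.log2 n with hm'
  have hlow : 2 ^ m ≤ n := Nat.log2_self_le (by omega)
  have hhigh : n < 2 ^ (m + 1) := Nat.lt_log2_self
  have hm2 : 2 ≤ m := by
    by_contra hc
    have : 2 ^ (m + 1) ≤ 4 := by interval_cases m <;> norm_num
    omega
  refine ⟨m - 2, ?_, ?_⟩
  · calc (4:ℤ) * 2 ^ (m - 2) = ((4 * 2 ^ (m - 2) : ℕ) : ℤ) := by push_cast; ring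
    _ ≤ (n : ℤ) := by
        have : 4 * 2 ^ (m - 2) = 2 ^ m := by
          rw [show (4:ℕ) = 2 ^ 2 from rfl, ← pow_add]
          congr 1
          omega
        exact_mod_cast this ▸ hlow
    _ = size := hn
  · calc size = (n : ℤ) := hn.symm
    _ < ((5 * 2 ^ (m - 2) : ℕ) : ℤ) := by exact_mod_cast hlt
    _ = 5 * 2 ^ (m - 2) := by push_cast; ring

-- ===== VERDICT (by name: the statement is the Claim_ definition above) =====
theorem base_get_src_pos_spec : Claim_equal_base_get_src_pos := by
  intro size x y _ hpre
  obtain ⟨k, hb1, hb2⟩ := pv_pre_chain size x y hpre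
  unfold Spec_base_get_src_pos base_get_src_pos base_get_src_pos_alt
  rw [pv_go_eq size.toNat k (pv_fuel_enough k size hb1) size x y 0 hb1 hb2]
  norm_num
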